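-- pv_equiv track=rewrite | github.com/5ma11wh1t3/DynOP | src/find_reg_gadget_chain.py | remove_subpaths
-- ===== SOURCE A (Python) =====
-- def remove_subpaths(paths):
--     cleaned = []
--     for i, path_i in enumerate(paths):
--         is_subpath = False
--         for j, path_j in enumerate(paths):
--             if i != j and len(path_i) < len(path_j):
--                 if path_i == path_j[:len(path_i)]:
--                     is_subpath = True
--                     break
--         if not is_subpath:
--             cleaned.append(path_i)
--     return cleaned
-- ===== SOURCE B (Python) =====
-- def remove_subpaths(paths):
--     # One pass collects candidate proper prefixes (only lengths that actually
--     # occur among the paths can match), then a filter by set membership.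
--     lens = sorted({len(p) for p in paths})
--     prefixes = set()
--     for q in paths:
--         for l in lens:
--             if l >= len(q):
--                 break
--             prefixes.add(tuple(q[:l]))
--     return [p for p in paths if tuple(p) not in prefixes]
-- ===== Notes on version B (the rewrite author's own statement) =====
-- stated objective: faster
-- what changed: Replaces the all-pairs prefix comparison by one pass that collects candidate proper prefixes (only lengths occurring among the paths) into a set, then filters by set membership.
import Mathlib
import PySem

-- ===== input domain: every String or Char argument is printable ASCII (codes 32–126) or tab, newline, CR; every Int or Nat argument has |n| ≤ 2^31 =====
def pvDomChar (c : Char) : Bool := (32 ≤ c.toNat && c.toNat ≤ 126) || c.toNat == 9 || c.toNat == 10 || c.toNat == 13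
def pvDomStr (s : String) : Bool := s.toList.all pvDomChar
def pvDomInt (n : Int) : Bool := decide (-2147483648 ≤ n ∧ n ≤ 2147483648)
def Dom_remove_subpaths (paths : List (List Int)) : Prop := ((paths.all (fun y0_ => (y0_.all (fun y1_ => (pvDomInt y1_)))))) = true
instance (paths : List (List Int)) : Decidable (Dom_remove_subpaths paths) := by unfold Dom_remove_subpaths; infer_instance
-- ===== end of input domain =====

-- B replaces A's all-pairs prefix comparison by one pass that collects the candidate
-- proper prefixes (only lengths that occur among the paths) into a set, then filters
-- by set membership (objective: faster, measured).

-- ===== PORT A =====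
def remove_subpaths (paths : List (List Int)) : List (List Int) :=
  (PySem.List.enumerate paths).foldl
    (fun cleaned ip =>
      let is_subpath :=
        (PySem.List.enumerate paths).any (fun jp =>
          decide (ip.1 ≠ jp.1) && decide (ip.2.length < jp.2.length) &&
            decide (ip.2 = PySem.List.slice jp.2 none (some (ip.2.length : Int))))
      if is_subpath then cleaned else cleaned ++ [ip.2])
    []

-- ===== PORT B =====
-- the inner 'for l in lens: if l >= len(q): break; prefixes.add(tuple(q[:l]))'
def pvAddPrefixes (q : List Int) : List Int → PySem.Set (List Int) → PySem.Set (List Int)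
  | [], pre => pre
  | l :: rest, pre =>
      if (q.length : Int) ≤ l then pre
      else pvAddPrefixes q rest (PySem.Set.add pre (PySem.List.slice q none (some l)))

def remove_subpaths_alt (paths : List (List Int)) : List (List Int) :=
  let lens : List Int :=
    PySem.List.sorted (PySem.Set.ofList (paths.map (fun p => (p.length : Int)))) (fun x => x) false
  let prefixes : PySem.Set (List Int) :=
    paths.foldl (fun pre q => pvAddPrefixes q lens pre) PySem.Set.empty
  paths.filter (fun p => !(PySem.Set.contains prefixes p))

-- ===== PRECONDITION & SPEC =====
def Spec_remove_subpaths (paths : List (List Int)) (out : List (List Int)) : Prop := out = remove_subpaths_alt paths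
instance (paths : List (List Int)) (out : List (List Int)) : Decidable (Spec_remove_subpaths paths out) := by unfold Spec_remove_subpaths; infer_instance

-- ===== CLAIM (what is proved, stated in full; the proofs are below) =====
def Claim_equal_remove_subpaths : Prop := ∀ (paths : List (List Int)), Dom_remove_subpaths paths → Spec_remove_subpaths paths (remove_subpaths paths)

-- ===== LEMMAS AND PROOFS =====

-- membership in the inner loop's result, for a strictly increasing length list
theorem mem_pvAddPrefixes (q : List Int) (lens : List Int) (hso : lens.Pairwise (· < ·))
    (pre : PySem.Set (List Int)) (p : List Int) :
    p ∈ pvAddPrefixes q lens pre ↔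
      p ∈ pre ∨ ∃ l ∈ lens, l < (q.length : Int) ∧ p = PySem.List.slice q none (some l) := by
  induction lens generalizing pre with
  | nil => simp [pvAddPrefixes]
  | cons l rest ih =>
      rw [List.pairwise_cons] at hso
      obtain ⟨hlt, hrest⟩ := hso
      by_cases hl : (q.length : Int) ≤ l
      · simp only [pvAddPrefixes, if_pos hl]
        constructor
        · exact Or.inl
        · rintro (hp | ⟨l', hl', hlen, _⟩)
          · exact hp
          · rcases List.mem_cons.mp hl' with rfl | hl'
            · omega
            · have := hlt l' hl'; omega
      · simp only [pvAddPrefixes, if_neg hl]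
        rw [ih hrest, PySem.Set.mem_add]
        constructor
        · rintro ((hp | rfl) | ⟨l', hl', hlen, rfl⟩)
          · exact Or.inl hp
          · exact Or.inr ⟨l, by simp, by omega, rfl⟩
          · exact Or.inr ⟨l', by simp [hl'], hlen, rfl⟩
        · rintro (hp | ⟨l', hl', hlen, rfl⟩)
          · exact Or.inl (Or.inl hp)
          · rcases List.mem_cons.mp hl' with rfl | hl'
            · exact Or.inl (Or.inr rfl)
            · exact Or.inr ⟨l', hl', hlen, rfl⟩

-- membership in B's prefix set
theorem mem_prefixSet (qs : List (List Int)) (lens : List Int)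
    (hso : lens.Pairwise (· < ·)) (p : List Int) (s : PySem.Set (List Int)) :
    (p ∈ qs.foldl (fun pre q => pvAddPrefixes q lens pre) s) ↔
      p ∈ s ∨ ∃ q ∈ qs, ∃ l ∈ lens, l < (q.length : Int) ∧ p = PySem.List.slice q none (some l) := by
  induction qs generalizing s with
  | nil => simp
  | cons q rest ih =>
      rw [List.foldl_cons, ih, mem_pvAddPrefixes q lens hso]
      constructor
      · rintro ((hp | ⟨l, hl, hlen, rfl⟩) | ⟨r, hr, l, hl, hlen, rfl⟩)
        · exact Or.inl hp
        · exact Or.inr ⟨q, by simp, l, hl, hlen, rfl⟩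
        · exact Or.inr ⟨r, by simp [hr], l, hl, hlen, rfl⟩
      · rintro (hp | ⟨r, hr, l, hl, hlen, rfl⟩)
        · exact Or.inl (Or.inl hp)
        · rcases List.mem_cons.mp hr with rfl | hr
          · exact Or.inl (Or.inr ⟨l, hl, hlen, rfl⟩)
          · exact Or.inr ⟨r, hr, l, hl, hlen, rfl⟩

-- A's inner loop, at an element of enumerate, tests exactly proper-prefix-hood
theorem condA_iff (paths : List (List Int)) (i : Int) (p : List Int)
    (h : (i, p) ∈ PySem.List.enumerate paths) :
    ((PySem.List.enumerate paths).any (fun jp =>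
        decide (i ≠ jp.1) && decide (p.length < jp.2.length) &&
          decide (p = PySem.List.slice jp.2 none (some (p.length : Int)))) = true) ↔
    ∃ q ∈ paths, ∃ k : Nat, k < q.length ∧ p = q.take k := by
  rw [List.any_eq_true]
  constructor
  · rintro ⟨jp, hjp, hpred⟩
    rw [PySem.List.mem_enumerate_iff] at hjp
    obtain ⟨j, hj, rfl⟩ := hjp
    simp only [Bool.and_eq_true, decide_eq_true_eq] at hpred
    obtain ⟨⟨_, hlen⟩, heq⟩ := hpred
    rw [PySem.List.slice_to_natCast] at heq
    exact ⟨paths[j], List.getElem_mem hj, p.length, hlen, heq⟩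
  · rintro ⟨q, hq, k, hk, rfl⟩
    obtain ⟨j, hj, rfl⟩ := List.getElem_of_mem hq
    have hlen : (List.take k paths[j]).length = k := by simp; omega
    refine ⟨((j : Int), paths[j]), ?_, ?_⟩
    · rw [PySem.List.mem_enumerate_iff]; exact ⟨j, hj, by simp⟩
    · rw [PySem.List.mem_enumerate_iff] at h
      obtain ⟨i0, hi0, hpair⟩ := h
      simp only [Prod.mk.injEq] at hpair
      obtain ⟨rfl, hp⟩ := hpair
      have hne : (0 : Int) + (i0 : Int) ≠ (j : Int) := by
        intro he
        have hij : i0 = j := by omega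
        subst hij
        have := congrArg List.length hp
        simp at this
        omega
      simp only [Bool.and_eq_true, decide_eq_true_eq]
      refine ⟨⟨by simpa using hne, by rw [hlen]; omega⟩, ?_⟩
      rw [hlen, PySem.List.slice_to_natCast]

-- B's prefix-set membership of an actual path = proper-prefix-hood
theorem memB_iff (paths : List (List Int)) (p : List Int) (hp : p ∈ paths) :
    (p ∈ paths.foldl
        (fun pre q =>
          pvAddPrefixes q
            (PySem.List.sorted (PySem.Set.ofList (paths.map (fun r => (r.length : Int)))) (fun x => x) false)
            pre)
        PySem.Set.empty) ↔
      ∃ q ∈ paths, ∃ k : Nat, k < q.length ∧ p = q.take k := by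
  rw [mem_prefixSet paths _ (PySem.List.sorted_ofList_pairwise_lt _) p PySem.Set.empty]
  constructor
  · rintro (hs | ⟨q, hq, l, _, hlen, rfl⟩)
    · simp [PySem.Set.empty] at hs
    · have hl0 : 0 ≤ l := by
        by_contra hneg
        simp [PySem.List.slice, PySem.List.clampIdx] at *
        omega
      refine ⟨q, hq, l.toNat, by omega, ?_⟩
      rw [show l = ((l.toNat : Nat) : Int) by omega, PySem.List.slice_to_natCast]
      simp
      omega
  · rintro ⟨q, hq, k, hk, heq⟩
    refine Or.inr ⟨q, hq, (k : Int), ?_, by omega, ?_⟩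
    · rw [PySem.List.mem_sorted, PySem.Set.mem_ofList, List.mem_map]
      refine ⟨p, hp, ?_⟩
      have : p.length = k := by rw [heq]; simp; omega
      omega
    · rw [PySem.List.slice_to_natCast]; exact heq

-- A's outer loop is a filter of the second components
theorem foldl_enum_filter (c : List Int → Bool) (l : List (Int × List Int)) (acc : List (List Int)) :
    l.foldl (fun cleaned ip => if c ip.2 then cleaned else cleaned ++ [ip.2]) acc
      = acc ++ (l.map (·.2)).filter (fun p => !c p) := by
  induction l generalizing acc with
  | nil => simp
  | cons x xs ih =>
      simp only [List.foldl_cons, List.map_cons, List.filter_cons, ih]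
      cases hc : c x.2 <;> simp

-- ===== VERDICT (by name: the statement is the Claim_ definition above) =====
theorem remove_subpaths_spec : Claim_equal_remove_subpaths := by
  intro paths _
  unfold Spec_remove_subpaths remove_subpaths remove_subpaths_alt
  rw [PySem.List.foldl_congr_mem _ _
    (fun cleaned ip =>
      if PySem.Set.contains
          (paths.foldl
            (fun pre q =>
              pvAddPrefixes q
                (PySem.List.sorted (PySem.Set.ofList (paths.map (fun r => (r.length : Int)))) (fun x => x) false)
                pre)
            PySem.Set.empty) ip.2
       then cleaned else cleaned ++ [ip.2]) _ ?_]
  · rw [foldl_enum_filter, PySem.List.map_snd_enumerate]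
    rfl
  · intro acc ip hip
    obtain ⟨i, p⟩ := ip
    have hpmem : p ∈ paths := by
      rw [PySem.List.mem_enumerate_iff] at hip
      obtain ⟨k, hk, hpair⟩ := hip
      simp only [Prod.mk.injEq] at hpair
      rw [hpair.2]
      exact List.getElem_mem hk
    have hc : ((PySem.List.enumerate paths).any (fun jp =>
          decide (i ≠ jp.1) && decide (p.length < jp.2.length) &&
            decide (p = PySem.List.slice jp.2 none (some (p.length : Int)))))
        = PySem.Set.contains
            (paths.foldl
              (fun pre q =>
                pvAddPrefixes q
                  (PySem.List.sorted (PySem.Set.ofList (paths.map (fun r => (r.length : Int)))) (fun x => x) false)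
                  pre)
              PySem.Set.empty) p := by
      apply Bool.eq_iff_iff.mpr
      rw [condA_iff paths i p hip]
      rw [show (PySem.Set.contains _ p = true) ↔
            p ∈ (paths.foldl
              (fun pre q =>
                pvAddPrefixes q
                  (PySem.List.sorted (PySem.Set.ofList (paths.map (fun r => (r.length : Int)))) (fun x => x) false)
                  pre)
              PySem.Set.empty) from by simp [PySem.Set.contains]]
      rw [memB_iff paths p hpmem]
    simp only [hc]
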